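-- pv_equiv track=rewrite | github.com/mobiusdonut/USACO | 2018/February/herding.py | max0s
-- ===== SOURCE A (Python) =====
-- def max0s(arr):
--     count = 0
--     result = 0
--
--     for i in range(0, len(arr)):
--         if (arr[i] == 1):
--             count = 0
--         else:
--             count+= 1
--             result = max(result, count)
--     return result
-- ===== SOURCE B (Python) =====
-- def max0s(arr):
--     # Run-segmentation: scan maximal runs of non-1 elements with two indices
--     # instead of a running counter reset on every 1.
--     best = 0
--     i = 0
--     n = len(arr)
--     while i < n:
--         if arr[i] == 1:
--             i += 1
--         else:
--             j = i + 1
--             while j < n and arr[j] != 1: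
--                 j += 1
--             if j - i > best:
--                 best = j - i
--             i = j
--     return best
-- ===== Notes on version B (the rewrite author's own statement) =====
-- stated objective: alternative
-- what changed: Replaces the running counter that is reset at every 1 by a two-pointer run segmentation: an inner loop scans each maximal run of non-1 elements and the best run length is updated once per run instead of once per element.
import Mathlib
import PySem

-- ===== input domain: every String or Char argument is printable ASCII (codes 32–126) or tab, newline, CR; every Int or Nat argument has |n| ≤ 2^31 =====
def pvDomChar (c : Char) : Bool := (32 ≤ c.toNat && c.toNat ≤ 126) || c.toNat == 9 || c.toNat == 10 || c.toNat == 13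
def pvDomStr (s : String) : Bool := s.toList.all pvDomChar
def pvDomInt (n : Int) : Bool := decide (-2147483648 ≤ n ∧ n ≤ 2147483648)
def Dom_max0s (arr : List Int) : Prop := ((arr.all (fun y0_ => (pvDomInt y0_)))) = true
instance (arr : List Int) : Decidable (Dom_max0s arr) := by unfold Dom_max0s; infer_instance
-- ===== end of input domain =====

-- B replaces A's reset-counter scan by a two-pointer run segmentation (alternative decomposition, same cost).


-- ===== PORT A =====
-- A's loop: running count of current non-1 streak, reset on 1, result = max seen
def max0sLoop : List Int → Int → Int → Int
  | [], _, result => result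
  | x :: xs, count, result =>
    if x = 1 then max0sLoop xs 0 result
    else max0sLoop xs (count + 1) (max result (count + 1))

def max0s (arr : List Int) : Int := max0sLoop arr 0 0

-- ===== PORT B =====
-- B's outer loop: skip 1s; at a non-1, the inner scan (takeWhile) consumes the
-- whole maximal run, best is updated with the run length, and we resume after it.
def max0sRuns : List Int → Int → Int
  | [], best => best
  | x :: xs, best =>
    if x = 1 then max0sRuns xs best
    else
      max0sRuns (xs.dropWhile (fun y => !decide (y = 1)))
        (max best (1 + ((xs.takeWhile (fun y => !decide (y = 1))).length : Int)))
termination_by xs _ => xs.length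
decreasing_by
  · simp
  · have := List.length_dropWhile_le (p := fun y => !decide (y = 1)) (l := xs)
    simp; omega

def max0s_alt (arr : List Int) : Int := max0sRuns arr 0

-- ===== PRECONDITION & SPEC =====
def Spec_max0s (arr : List Int) (out : Int) : Prop := out = max0s_alt arr
instance (arr : List Int) (out : Int) : Decidable (Spec_max0s arr out) := by unfold Spec_max0s; infer_instance

-- ===== CLAIM (what is proved, stated in full; the proofs are below) =====
def Claim_equal_max0s : Prop := ∀ (arr : List Int), Dom_max0s arr → Spec_max0s arr (max0s arr)

-- ===== LEMMAS AND PROOFS =====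

/-- Common characterisation: `hRun xs c` = the longest streak of non-1s, with the
current streak already `c` long. -/
def hRun : List Int → Int → Int
  | [], c => c
  | x :: xs, c => if x = 1 then max c (hRun xs 0) else hRun xs (c + 1)

theorem hRun_ge : ∀ (xs : List Int) (c : Int), c ≤ hRun xs c := by
  intro xs
  induction xs with
  | nil => intro c; simp [hRun]
  | cons x xs ih =>
    intro c
    by_cases hx : x = 1
    · simp [hRun, hx]
    · simp only [hRun, if_neg hx]
      have := ih (c + 1)
      omega

theorem hRun_nonone : ∀ (g rest : List Int) (c : Int), (∀ x ∈ g, x ≠ 1) →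
    hRun (g ++ rest) c = hRun rest (c + (g.length : Int)) := by
  intro g
  induction g with
  | nil => intro rest c _; simp
  | cons x g ih =>
    intro rest c hg
    have hx : x ≠ 1 := hg x (by simp)
    simp only [List.cons_append, hRun, if_neg hx]
    rw [ih rest (c + 1) (fun y hy => hg y (by simp [hy]))]
    congr 1
    push_cast [List.length_cons]
    ring

theorem hRun_cons_one (t : List Int) (c : Int) : hRun (1 :: t) c = max c (hRun t 0) := by
  simp only [hRun]
  norm_num

theorem hRun_restart : ∀ (rest : List Int) (m : Int), 0 ≤ m →
    (rest = [] ∨ ∃ t, rest = 1 :: t) → hRun rest m = max m (hRun rest 0) := by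
  intro rest m hm hrest
  rcases hrest with h | ⟨t, h⟩
  · subst h; simp only [hRun]; omega
  · subst h
    rw [hRun_cons_one, hRun_cons_one]
    have := hRun_ge t 0
    omega

theorem dropWhile_head_one : ∀ (xs : List Int),
    xs.dropWhile (fun y => !decide (y = 1)) = [] ∨
    ∃ t, xs.dropWhile (fun y => !decide (y = 1)) = 1 :: t := by
  intro xs
  induction xs with
  | nil => left; rfl
  | cons x xs ih =>
    by_cases hx : x = 1
    · right; subst hx; exact ⟨xs, by simp [List.dropWhile]⟩
    · simpa [List.dropWhile, hx] using ih

theorem max0sLoop_eq : ∀ (xs : List Int) (c r : Int), 0 ≤ c → c ≤ r →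
    max0sLoop xs c r = max r (hRun xs c) := by
  intro xs
  induction xs with
  | nil =>
    intro c r _ hcr
    simp only [max0sLoop, hRun]
    omega
  | cons x xs ih =>
    intro c r hc hcr
    by_cases hx : x = 1
    · simp only [max0sLoop, hRun, if_pos hx]
      rw [ih 0 r le_rfl (by omega)]
      omega
    · simp only [max0sLoop, hRun, if_neg hx]
      rw [ih (c + 1) (max r (c + 1)) (by omega) (by omega)]
      have := hRun_ge xs (c + 1)
      omega

theorem max0sRuns_eq : ∀ (n : Nat) (xs : List Int) (b : Int), xs.length ≤ n → 0 ≤ b →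
    max0sRuns xs b = max b (hRun xs 0) := by
  intro n
  induction n with
  | zero =>
    intro xs b hlen hb
    have : xs = [] := List.eq_nil_of_length_eq_zero (by omega)
    subst this
    simp only [max0sRuns, hRun]
    omega
  | succ n ih =>
    intro xs b hlen hb
    match xs with
    | [] =>
      simp only [max0sRuns, hRun]
      omega
    | x :: xs =>
      by_cases hx : x = 1
      · simp only [max0sRuns, if_pos hx]
        rw [ih xs b (by simpa using hlen) hb]
        simp only [hRun, if_pos hx]
        have := hRun_ge xs 0
        omega
      · simp only [max0sRuns, if_neg hx]
        set p : Int → Bool := fun y => !decide (y = 1) with hp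
        have hsplit : xs.takeWhile p ++ xs.dropWhile p = xs := List.takeWhile_append_dropWhile
        have hlen' : (xs.dropWhile p).length ≤ n := by
          have := List.length_dropWhile_le (p := p) (l := xs)
          simp at hlen; omega
        have hg : (0:Int) ≤ ((xs.takeWhile p).length : Int) := by positivity
        rw [ih (xs.dropWhile p) _ hlen' (by omega)]
        have htake : ∀ y ∈ xs.takeWhile p, y ≠ 1 := by
          intro y hy
          have := List.mem_takeWhile_imp hy
          simpa [hp] using this
        have hA : hRun (x :: xs) 0 = hRun (xs.dropWhile p) (1 + ((xs.takeWhile p).length : Int)) := by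
          have hcons : hRun (x :: xs) 0 = hRun xs (0 + 1) := by
            simp only [hRun, if_neg hx]
          rw [hcons]
          conv_lhs => rw [← hsplit]
          rw [hRun_nonone (xs.takeWhile p) (xs.dropWhile p) (0 + 1) htake]
          congr 1
        rw [hA, hRun_restart (xs.dropWhile p) (1 + ((xs.takeWhile p).length : Int))
              (by omega) (dropWhile_head_one xs)]
        have := hRun_ge (xs.dropWhile p) 0
        omega

-- ===== VERDICT (by name: the statement is the Claim_ definition above) =====
theorem max0s_spec : Claim_equal_max0s := by
  intro arr _
  unfold Spec_max0s max0s max0s_alt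
  rw [max0sLoop_eq arr 0 0 le_rfl le_rfl,
      max0sRuns_eq arr.length arr 0 le_rfl le_rfl]
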